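-- pv_equiv track=rewrite | github.com/RunjeethNikam/Leetcode | hackerrank.py | check
-- ===== SOURCE A (Python) =====
-- def check(given, mid, diff, y):
--     count = 0
--     for i in range(len(given)):
--         given[i] -= y * mid
--         while given[i] > 0:
--             given[i] -= diff
--             count += 1
--     return count <= mid
-- ===== SOURCE B (Python) =====
-- def check(given, mid, diff, y):
--     cut = y * mid
--     count = sum(-((cut - g) // diff) for g in given if g > cut)
--     return count <= mid
-- ===== Notes on version B (the rewrite author's own statement) =====
-- stated objective: faster
-- what changed: Replaced the inner repeated-subtraction while loop (O(value/diff) iterations per element) with a single ceiling division per element summed in one pass (B does not mutate the list); a timing run measured B ~2.8x faster at the largest size.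
-- outside the precondition, e.g. on check([5], 1, -1, 0): A does not finish within the time limit, B returns True
import Mathlib
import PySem

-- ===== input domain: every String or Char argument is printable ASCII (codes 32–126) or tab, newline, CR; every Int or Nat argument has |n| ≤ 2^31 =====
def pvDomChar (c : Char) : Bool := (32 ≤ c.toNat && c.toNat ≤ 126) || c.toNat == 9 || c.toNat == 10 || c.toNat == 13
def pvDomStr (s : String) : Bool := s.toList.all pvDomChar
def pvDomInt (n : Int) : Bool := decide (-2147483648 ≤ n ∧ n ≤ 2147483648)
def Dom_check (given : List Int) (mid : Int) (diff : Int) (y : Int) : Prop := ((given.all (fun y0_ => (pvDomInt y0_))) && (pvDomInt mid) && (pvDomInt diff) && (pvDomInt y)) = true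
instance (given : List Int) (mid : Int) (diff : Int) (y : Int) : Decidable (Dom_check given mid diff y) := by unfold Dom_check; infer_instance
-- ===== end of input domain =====

-- B replaces A's inner repeated-subtraction loop by one ceiling division per element;
-- A mutates `given` in place, B does not — the equivalence proved here is about the RETURN value only.

-- ===== PORT A =====
-- Python's `while given[i] > 0: given[i] -= diff; count += 1`: returns (final value, iterations).
-- The `0 < d` part of the guard only makes the function total; on inputs where it differs from
-- Python (0 < x and d ≤ 0) the Python loop never terminates, and Pre_check excludes them.
-- tail-recursive (accumulator = Python's running `count`) so the compiled port evaluates on deep loops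
def innerA (x d c : Int) : Int × Int :=
  if h : 0 < x ∧ 0 < d then innerA (x - d) d (c + 1)
  else (x, c)
termination_by x.toNat
decreasing_by omega

def stepA (y mid d : Int) (st : List Int × Int) (i : Nat) : List Int × Int :=
  let v := st.1.getD i 0 - y * mid
  let r := innerA v d st.2
  (st.1.set i r.1, r.2)

def check (given : List Int) (mid : Int) (diff : Int) (y : Int) : Bool :=
  let res := (List.range given.length).foldl (stepA y mid diff) (given, 0)
  decide (res.2 ≤ mid)

-- ===== PORT B =====
def check_alt (given : List Int) (mid : Int) (diff : Int) (y : Int) : Bool :=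
  let cut := y * mid
  let count := ((given.filter (fun g => decide (cut < g))).map
      (fun g => -(PySem.Int.floordiv (cut - g) diff))).sum
  decide (count ≤ mid)

-- ===== PRECONDITION & SPEC =====
-- Pre_ excludes exactly the inputs on which A's inner while loop never terminates
-- (diff ≤ 0 while some element stays positive after the subtraction of y*mid).
def Pre_check (given : List Int) (mid : Int) (diff : Int) (y : Int) : Prop :=
  0 < diff ∨ ∀ g ∈ given, g ≤ y * mid
instance (given : List Int) (mid : Int) (diff : Int) (y : Int) : Decidable (Pre_check given mid diff y) := by unfold Pre_check; infer_instance

def pvWitness_check : List Int × Int × Int × Int := ([3, 10, -4], 2, 2, 1)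

def Spec_check (given : List Int) (mid : Int) (diff : Int) (y : Int) (out : Bool) : Prop := out = check_alt given mid diff y
instance (given : List Int) (mid : Int) (diff : Int) (y : Int) (out : Bool) : Decidable (Spec_check given mid diff y out) := by unfold Spec_check; infer_instance

-- ===== CLAIM (what is proved, stated in full; the proofs are below) =====
def Claim_equal_check : Prop := ∀ (given : List Int) (mid : Int) (diff : Int) (y : Int), Dom_check given mid diff y → Pre_check given mid diff y → Spec_check given mid diff y (check given mid diff y)

-- ===== LEMMAS AND PROOFS =====

-- iteration count of the inner loop, when it terminates, is the ceiling division
theorem innerA_count_pos (x d c : Int) (hd : 0 < d) :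
    (innerA x d c).2 = c + (if 0 < x then -(PySem.Int.floordiv (-x) d) else 0) := by
  induction x, c using innerA.induct (d := d) with
  | case1 x c h ih =>
      rw [innerA, dif_pos h, ih, if_pos h.1]
      by_cases h1 : 0 < x - d
      · rw [if_pos h1]
        obtain ⟨hb1, hb2⟩ := (PySem.Int.neg_floordiv_neg_eq_iff_of_pos hd).mp
          (rfl : -(PySem.Int.floordiv (-(x - d)) d) = -(PySem.Int.floordiv (-(x - d)) d))
        have : -(PySem.Int.floordiv (-x) d) = -(PySem.Int.floordiv (-(x - d)) d) + 1 := by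
          rw [PySem.Int.neg_floordiv_neg_eq_iff_of_pos hd]
          constructor <;> nlinarith
        rw [this]; ring
      · rw [if_neg h1]
        have : -(PySem.Int.floordiv (-x) d) = 1 := by
          rw [PySem.Int.neg_floordiv_neg_eq_iff_of_pos hd]
          constructor <;> nlinarith [h.1]
        rw [this]; ring
  | case2 x c h =>
      rw [innerA, dif_neg h]
      have hx : ¬ 0 < x := fun hx => h ⟨hx, hd⟩
      simp [hx]

theorem innerA_count_nonpos (x d c : Int) (hx : ¬ 0 < x) : (innerA x d c).2 = c := by
  rw [innerA]
  have : ¬ (0 < x ∧ 0 < d) := fun h => hx h.1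
  simp [this]

-- shifting the inner loop's accumulator out
theorem innerA_acc (x d c : Int) : ∀ a : Int, (innerA x d (a + c)).2 = a + (innerA x d c).2 := by
  induction x, c using innerA.induct (d := d) with
  | case1 x c h ih =>
      intro a
      conv_lhs => rw [innerA]
      conv_rhs => rw [innerA]
      rw [dif_pos h, dif_pos h, show a + c + 1 = a + (c + 1) by ring, ih a]
  | case2 x c h =>
      intro a
      conv_lhs => rw [innerA]
      conv_rhs => rw [innerA]
      rw [dif_neg h, dif_neg h]

-- the inner loop's final value: irrelevant to the count, but the fold carries it
theorem foldA_gen (y mid d : Int) :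
    ∀ (n k : Nat) (lst : List Int) (c : Int), k + n = lst.length →
      ((List.range' k n).foldl (stepA y mid d) (lst, c)).2 =
        c + ((lst.drop k).map (fun g => (innerA (g - y * mid) d 0).2)).sum := by
  intro n
  induction n with
  | zero =>
      intro k lst c h
      simp [List.drop_of_length_le (by omega : lst.length ≤ k)]
  | succ n ih =>
      intro k lst c h
      rw [List.range'_succ, List.foldl_cons]
      have hk : k < lst.length := by omega
      have hset : ((stepA y mid d (lst, c) k).1).length = lst.length := by
        simp [stepA]
      rw [ih (k + 1) _ _ (by simp [stepA]; omega)]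
      have hdropset : ((lst.set k (innerA (lst.getD k 0 - y * mid) d c).1).drop (k + 1)) =
          lst.drop (k + 1) := by
        apply List.ext_getElem
        · simp
        · intro i hi1 hi2
          simp only [List.getElem_drop]
          rw [List.getElem_set_ne (by omega)]
      have hdrop : lst.drop k = lst[k] :: lst.drop (k + 1) :=
        List.drop_eq_getElem_cons hk
      simp only [stepA, hdropset, hdrop, List.map_cons, List.sum_cons]
      rw [List.getD_eq_getElem lst 0 hk]
      have hacc : (innerA (lst[k] - y * mid) d c).2 =
          c + (innerA (lst[k] - y * mid) d 0).2 := by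
        simpa using innerA_acc (lst[k] - y * mid) d 0 c
      rw [hacc]
      ring

theorem countA_eq (given : List Int) (mid d y : Int) :
    ((List.range given.length).foldl (stepA y mid d) (given, 0)).2 =
      (given.map (fun g => (innerA (g - y * mid) d 0).2)).sum := by
  rw [List.range_eq_range', foldA_gen y mid d given.length 0 given 0 (by omega)]
  simp

-- pointwise agreement of the two per-element counts, then summed
theorem sum_eq (given : List Int) (cut d : Int)
    (hpre : 0 < d ∨ ∀ g ∈ given, g ≤ cut) :
    (given.map (fun g => (innerA (g - cut) d 0).2)).sum =
      ((given.filter (fun g => decide (cut < g))).map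
        (fun g => -(PySem.Int.floordiv (cut - g) d))).sum := by
  induction given with
  | nil => simp
  | cons a t ih =>
      have hpre' : 0 < d ∨ ∀ g ∈ t, g ≤ cut := by
        rcases hpre with h | h
        · exact Or.inl h
        · exact Or.inr fun g hg => h g (List.mem_cons_of_mem a hg)
      simp only [List.map_cons, List.sum_cons, List.filter_cons]
      by_cases hcut : cut < a
      · have hd : 0 < d := by
          rcases hpre with h | h
          · exact h
          · exact absurd (h a (List.mem_cons_self)) (by omega)
        rw [innerA_count_pos _ _ _ hd]
        simp only [hcut, decide_true, if_pos, List.map_cons, List.sum_cons, ih hpre']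
        have : 0 < a - cut := by omega
        rw [if_pos this]
        ring_nf
      · rw [innerA_count_nonpos _ _ _ (by omega)]
        simp only [hcut, decide_false, Bool.false_eq_true, if_false, ih hpre']
        ring

-- ===== VERDICT (by name: the statement is the Claim_ definition above) =====
theorem check_spec : Claim_equal_check := by
  intro given mid diff y _ hpre
  unfold Spec_check check check_alt
  simp only []
  rw [countA_eq, sum_eq given (y * mid) diff hpre]
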